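-- pv_equiv track=rewrite | github.com/ldendro/sage | app/components/results.py | _build_display_names
-- ===== SOURCE A (Python) =====
-- from typing import Dict, List, Optional
--
-- def _build_display_names(portfolios: List[dict]) -> Dict[str, str]:
--     counts: Dict[str, int] = {}
--     for portfolio in portfolios:
--         counts[portfolio["name"]] = counts.get(portfolio["name"], 0) + 1
--
--     name_map: Dict[str, str] = {}
--     for portfolio in portfolios:
--         name = portfolio["name"]
--         if counts.get(name, 0) > 1:
--             suffix = portfolio["id"].split("_")[-1]
--             name_map[portfolio["id"]] = f"{name} ({suffix})"
--         else:
--             name_map[portfolio["id"]] = name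
--     return name_map
-- ===== SOURCE B (Python) =====
-- from typing import Dict, List
--
--
-- def _build_display_names(portfolios: List[dict]) -> Dict[str, str]:
--     # Detect duplicated names by sorting them and scanning adjacent pairs,
--     # then build the map in one pass over the portfolios.
--     names = sorted(p["name"] for p in portfolios)
--     dups = {a for a, b in zip(names, names[1:]) if a == b}
--     name_map: Dict[str, str] = {}
--     for p in portfolios:
--         name = p["name"]
--         if name in dups:
--             name_map[p["id"]] = f"{name} ({p['id'].split('_')[-1]})"
--         else:
--             name_map[p["id"]] = name
--     return name_map
-- ===== Notes on version B (the rewrite author's own statement) =====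
-- stated objective: alternative
-- what changed: A counts every name in a dict and tests count>1 per portfolio; B finds the set of duplicated names by sorting the names and scanning adjacent pairs, then builds the map by a set-membership test, with no counting dict at all.
import Mathlib
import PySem

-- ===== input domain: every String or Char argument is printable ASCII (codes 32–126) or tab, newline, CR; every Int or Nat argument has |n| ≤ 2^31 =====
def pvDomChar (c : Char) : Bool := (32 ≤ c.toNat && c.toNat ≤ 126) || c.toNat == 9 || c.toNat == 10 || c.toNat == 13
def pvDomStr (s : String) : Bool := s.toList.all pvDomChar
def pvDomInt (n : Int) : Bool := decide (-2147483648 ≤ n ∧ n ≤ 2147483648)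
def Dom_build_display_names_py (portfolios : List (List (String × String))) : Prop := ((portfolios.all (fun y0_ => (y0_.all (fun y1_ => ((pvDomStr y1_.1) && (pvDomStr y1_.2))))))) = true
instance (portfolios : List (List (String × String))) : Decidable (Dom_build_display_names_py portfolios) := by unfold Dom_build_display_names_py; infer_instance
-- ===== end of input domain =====

-- B replaces A's counting dict by sort-then-adjacent-scan duplicate detection; objective: alternative (same results, different mechanism).

-- p[k] for a portfolio dict; exact when k is a key of p (guaranteed by Pre_), Python raises KeyError otherwise.
def pvItem (p : List (String × String)) (k : String) : String :=
  ((PySem.Dict.mk p).get? k).getD ""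

-- ===== PORT A =====
def build_display_names_py (portfolios : List (List (String × String))) : List (String × String) :=
  let counts : PySem.Dict String Int :=
    portfolios.foldl (fun d p => d.insert (pvItem p "name") (d.getD (pvItem p "name") 0 + 1)) PySem.Dict.empty
  let name_map : PySem.Dict String String :=
    portfolios.foldl (fun d p =>
      let name := pvItem p "name"
      if counts.getD name 0 > 1 then
        -- p["id"].split("_")[-1]; split? is some because the separator "_" is nonempty, and the split is never []
        let suffix := PySem.List.pyGetD ((PySem.Str.split? (pvItem p "id") "_").getD []) (-1) ""
        d.insert (pvItem p "id") (name ++ " (" ++ suffix ++ ")")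
      else
        d.insert (pvItem p "id") name) PySem.Dict.empty
  name_map.items

-- ===== PORT B =====
def build_display_names_py_alt (portfolios : List (List (String × String))) : List (String × String) :=
  let names : List String := PySem.List.sorted (portfolios.map (fun p => pvItem p "name")) (fun x => x) false
  let dups : PySem.Set String :=
    PySem.Set.ofList (((names.zip (PySem.List.slice names (some 1) none)).filter (fun q => q.1 == q.2)).map (·.1))
  let name_map : PySem.Dict String String :=
    portfolios.foldl (fun d p =>
      let name := pvItem p "name"
      if PySem.Set.contains dups name then
        d.insert (pvItem p "id") (name ++ " (" ++ PySem.List.pyGetD ((PySem.Str.split? (pvItem p "id") "_").getD []) (-1) "" ++ ")")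
      else
        d.insert (pvItem p "id") name) PySem.Dict.empty
  name_map.items

-- ===== PRECONDITION & SPEC =====
-- Pre_: every portfolio has the keys "name" and "id" — A raises KeyError otherwise (and so does B).
def Pre_build_display_names_py (portfolios : List (List (String × String))) : Prop :=
  ∀ p ∈ portfolios, "name" ∈ p.map (·.1) ∧ "id" ∈ p.map (·.1)
instance (portfolios : List (List (String × String))) : Decidable (Pre_build_display_names_py portfolios) := by unfold Pre_build_display_names_py; infer_instance

def pvWitness_build_display_names_py : (List (List (String × String))) :=
  [[("name", "Alpha"), ("id", "pf_1")], [("name", "Alpha"), ("id", "pf_2")], [("name", "Beta"), ("id", "pf_3")]]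

def Spec_build_display_names_py (portfolios : List (List (String × String))) (out : List (String × String)) : Prop := out = build_display_names_py_alt portfolios
instance (portfolios : List (List (String × String))) (out : List (String × String)) : Decidable (Spec_build_display_names_py portfolios out) := by unfold Spec_build_display_names_py; infer_instance

-- ===== CLAIM (what is proved, stated in full; the proofs are below) =====
def Claim_equal_build_display_names_py : Prop := ∀ (portfolios : List (List (String × String))), Dom_build_display_names_py portfolios → Pre_build_display_names_py portfolios → Spec_build_display_names_py portfolios (build_display_names_py portfolios)

-- ===== LEMMAS AND PROOFS =====

-- In a ≤-sorted list, some adjacent pair equals a iff a occurs at least twice.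
lemma pv_adj_dup_iff (s : List String) (hs : s.Pairwise (· ≤ ·)) (a : String) :
    a ∈ ((s.zip s.tail).filter (fun q => q.1 == q.2)).map (·.1) ↔ 2 ≤ s.count a := by
  induction s with
  | nil => simp
  | cons x t ih =>
    rcases List.pairwise_cons.mp hs with ⟨hx, ht⟩
    cases t with
    | nil =>
      simp only [List.tail_cons, List.zip_nil_right, List.filter_nil, List.map_nil,
        List.not_mem_nil, false_iff, not_le, List.count_cons, List.count_nil]
      split <;> omega
    | cons y t' =>
      have ihy := ih ht
      simp only [List.tail_cons] at ihy ⊢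
      rw [List.zip_cons_cons, List.filter_cons]
      by_cases hxy : x = y
      · subst hxy
        rw [if_pos (by simp)]
        simp only [List.map_cons, List.mem_cons, ihy]
        simp only [List.count_cons, beq_iff_eq]
        by_cases hax : a = x <;> simp [hax, eq_comm]
      · rw [if_neg (by simpa using hxy)]
        rw [ihy]
        simp only [List.count_cons, beq_iff_eq]
        by_cases hax : x = a
        · subst hax
          constructor
          · intro h; omega
          · intro h
            exfalso
            have hmem : x ∈ y :: t' := by
              rw [← List.count_pos_iff]
              simp only [List.count_cons, beq_iff_eq] at h ⊢
              rw [if_pos trivial] at h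
              omega
            rcases List.mem_cons.mp hmem with rfl | hmem'
            · exact hxy rfl
            · exact hxy (le_antisymm (hx y (by simp)) ((List.pairwise_cons.mp ht).1 x hmem'))
        · simp [hax]

-- A's counts-dict test "counts.get(name, 0) > 1" and B's membership in the adjacent-duplicate
-- set decide the same condition, so the two map-building folds agree step by step.
lemma pv_main (portfolios : List (List (String × String))) :
    build_display_names_py portfolios = build_display_names_py_alt portfolios := by
  unfold build_display_names_py build_display_names_py_alt
  simp only []
  congr 1
  apply PySem.List.foldl_congr_mem
  intro acc p hp
  have hcount : (portfolios.foldl (fun d p => d.insert (pvItem p "name") (d.getD (pvItem p "name") 0 + 1)) PySem.Dict.empty).getD (pvItem p "name") 0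
      = ((portfolios.map (fun p => pvItem p "name")).count (pvItem p "name") : Int) := by
    rw [← List.foldl_map (f := fun p => pvItem p "name") (g := fun (d : PySem.Dict String Int) x => d.insert x (d.getD x 0 + 1))]
    rw [PySem.Dict.getD_foldl_insert_add_one]
    simp [PySem.Dict.getD_empty]
  have hdup : (PySem.Set.contains
      (PySem.Set.ofList ((((PySem.List.sorted (portfolios.map (fun p => pvItem p "name")) (fun x => x) false).zip
          (PySem.List.slice (PySem.List.sorted (portfolios.map (fun p => pvItem p "name")) (fun x => x) false) (some 1) none)).filter
          (fun q => q.1 == q.2)).map (·.1)))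
      (pvItem p "name") = true)
      ↔ 2 ≤ (portfolios.map (fun p => pvItem p "name")).count (pvItem p "name") := by
    rw [PySem.Set.contains_iff, PySem.Set.mem_ofList, PySem.List.slice_from_one,
      pv_adj_dup_iff _ (PySem.List.sorted_pairwise _ (fun x => x)),
      (PySem.List.sorted_perm (portfolios.map (fun p => pvItem p "name")) (fun x => x) false).count_eq]
  by_cases hc : 2 ≤ (portfolios.map (fun p => pvItem p "name")).count (pvItem p "name")
  · rw [if_pos (by rw [hcount]; exact_mod_cast hc), if_pos (hdup.mpr hc)]
  · rw [if_neg (by rw [hcount]; intro h; exact hc (by exact_mod_cast h)),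
        if_neg (fun h => hc (hdup.mp h))]

-- ===== VERDICT (by name: the statement is the Claim_ definition above) =====
theorem build_display_names_py_spec : Claim_equal_build_display_names_py := by
  intro portfolios _ _
  exact pv_main portfolios
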